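-- pv_equiv track=rewrite | github.com/rboltaboeva28/week4assignment | week6assignment.py | find_day_with_largest_swing
-- ===== SOURCE A (Python) =====
-- def get_daily_temp_swing(weather_day_tuple):
--     date, max_t, min_t, precip = weather_day_tuple
--     return max_t - min_t
--
-- def find_day_with_largest_swing(weather_data):
--     best_date = ''
--     best_swing = -1
--     first = True
--     for day in weather_data:
--         swing = get_daily_temp_swing(day)
--         if first:
--             best_date = day[0]
--             best_swing = swing
--             first = False
--         elif swing > best_swing:
--             best_date = day[0]
--             best_swing = swing
--         elif swing == best_swing:
--             pass
--     return best_date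
-- ===== SOURCE B (Python) =====
-- def get_daily_temp_swing(weather_day_tuple):
--     date, max_t, min_t, precip = weather_day_tuple
--     return max_t - min_t
--
-- def find_day_with_largest_swing(weather_data):
--     ordered = sorted(weather_data, key=get_daily_temp_swing, reverse=True)
--     if ordered:
--         return ordered[0][0]
--     return ''
-- ===== Notes on version B (the rewrite author's own statement) =====
-- stated objective: alternative
-- what changed: Replaces the single-pass running-max scan with first/best-state bookkeeping by a stable reverse sort on the swing key followed by taking the first element (stability makes the earliest day win ties, matching A's strict '>').
import Mathlib
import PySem

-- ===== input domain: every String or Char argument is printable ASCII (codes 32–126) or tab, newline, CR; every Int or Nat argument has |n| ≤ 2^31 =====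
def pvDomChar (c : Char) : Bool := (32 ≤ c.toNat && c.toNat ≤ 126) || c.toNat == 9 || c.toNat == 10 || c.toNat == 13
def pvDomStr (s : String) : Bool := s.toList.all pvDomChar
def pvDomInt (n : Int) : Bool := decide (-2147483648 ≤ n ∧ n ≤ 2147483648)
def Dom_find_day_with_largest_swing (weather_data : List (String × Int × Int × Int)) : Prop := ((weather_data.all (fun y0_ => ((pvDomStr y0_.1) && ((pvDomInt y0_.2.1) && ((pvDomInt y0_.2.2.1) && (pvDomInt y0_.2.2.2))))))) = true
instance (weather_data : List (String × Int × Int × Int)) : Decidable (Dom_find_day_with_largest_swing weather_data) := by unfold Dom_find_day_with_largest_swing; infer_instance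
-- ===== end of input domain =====

-- B sorts by swing (stable, reverse=True) and takes the first day instead of A's running-max scan; alternative, not faster.
-- ===== PORT A =====
def get_daily_temp_swing (weather_day_tuple : String × Int × Int × Int) : Int :=
  weather_day_tuple.2.1 - weather_day_tuple.2.2.1

def find_day_with_largest_swing (weather_data : List (String × Int × Int × Int)) : String :=
  (weather_data.foldl (fun (st : String × Int × Bool) day =>
      let swing := get_daily_temp_swing day
      if st.2.2 then (day.1, swing, false)
      else if swing > st.2.1 then (day.1, swing, false)
      else st)
    ("", -1, true)).1

-- ===== PORT B =====
def find_day_with_largest_swing_alt (weather_data : List (String × Int × Int × Int)) : String :=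
  let ordered := PySem.List.sorted weather_data get_daily_temp_swing true
  match ordered with
  | d :: _ => d.1
  | [] => ""

-- ===== PRECONDITION & SPEC =====
def Spec_find_day_with_largest_swing (weather_data : List (String × Int × Int × Int)) (out : String) : Prop := out = find_day_with_largest_swing_alt weather_data
instance (weather_data : List (String × Int × Int × Int)) (out : String) : Decidable (Spec_find_day_with_largest_swing weather_data out) := by unfold Spec_find_day_with_largest_swing; infer_instance

-- ===== CLAIM (what is proved, stated in full; the proofs are below) =====
def Claim_equal_find_day_with_largest_swing : Prop := ∀ (weather_data : List (String × Int × Int × Int)), Dom_find_day_with_largest_swing weather_data → Spec_find_day_with_largest_swing weather_data (find_day_with_largest_swing weather_data)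

-- ===== LEMMAS AND PROOFS =====

-- ===== VERDICT (by name: the statement is the Claim_ definition above) =====
-- A's loop step (flag already false) and the reverse-insertion step keep the same head.
theorem swing_loop_eq_sorted_head
    (t : List (String × Int × Int × Int)) :
    ∀ (h : String × Int × Int × Int) (tl : List (String × Int × Int × Int)),
    (t.foldl (fun (st : String × Int × Bool) day =>
        let swing := get_daily_temp_swing day
        if st.2.2 then (day.1, swing, false)
        else if swing > st.2.1 then (day.1, swing, false)
        else st) (h.1, get_daily_temp_swing h, false)).1
      = (match t.foldl (fun acc x =>
            PySem.List.insertBy (fun a b => decide (get_daily_temp_swing b < get_daily_temp_swing a)) x acc)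
            (h :: tl) with
         | d :: _ => d.1
         | [] => "") := by
  induction t with
  | nil => intro h tl; rfl
  | cons d t ih =>
    intro h tl
    simp only [List.foldl_cons, PySem.List.insertBy]
    by_cases hc : get_daily_temp_swing h < get_daily_temp_swing d
    · simp only [hc, decide_true, if_true, if_false, Bool.false_eq_true, gt_iff_lt]
      exact ih d (h :: tl)
    · simp only [hc, decide_false, if_false, Bool.false_eq_true, gt_iff_lt]
      exact ih h _

theorem find_day_with_largest_swing_spec : Claim_equal_find_day_with_largest_swing := by
  intro weather_data _
  unfold Spec_find_day_with_largest_swing find_day_with_largest_swing find_day_with_largest_swing_alt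
  cases weather_data with
  | nil => rfl
  | cons x t =>
    rw [PySem.List.sorted_rev_eq_foldl_insertBy]
    simp only [List.foldl_cons, if_true]
    exact swing_loop_eq_sorted_head t x []
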